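-- pv_equiv track=rewrite | github.com/laisdallemulle/ILR_optimization | ILR_optimization.py | distribute_str_qty_greedy
-- ===== SOURCE A (Python) =====
-- def distribute_str_qty_greedy(str_qty, num_lines):
--     # Sorts the numbers to facilitate distribution starting with the largest
--     str_qty.sort(reverse=True)
--
--     # Initializes lists to store the numbers in each line
--     lines = [[] for _ in range(num_lines)]
--     sums = [0] * num_lines
--
--     # Distributes each number to the line that results in the smallest difference of sums after insertion
--     for number in str_qty:
--         # Finds the line with the current smallest sum
--         index_smallest_sum = sums.index(min(sums))
--         lines[index_smallest_sum].append(number)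
--         sums[index_smallest_sum] += number
--
--     return lines, sums
-- ===== SOURCE B (Python) =====
-- def distribute_str_qty_greedy(str_qty, num_lines):
--     # Same in-place descending sort as A (observable mutation kept).
--     str_qty.sort(reverse=True)
--
--     m = num_lines if num_lines > 0 else 0
--     lines = [[] for _ in range(m)]
--     # Priority queue kept as a list of (sum, line_index) pairs, sorted
--     # ascending lexicographically; the head is always the target line.
--     pq = [(0, i) for i in range(m)]
--
--     for number in str_qty:
--         s, i = pq[0]
--         del pq[0]
--         lines[i].append(number)
--         # ordered re-insertion of the updated pair
--         new = (s + number, i)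
--         k = 0
--         while k < len(pq) and pq[k] < new:
--             k += 1
--         pq.insert(k, new)
--
--     sums = [0] * m
--     for s, i in pq:
--         sums[i] = s
--     return lines, sums
-- ===== Notes on version B (the rewrite author's own statement) =====
-- stated objective: alternative
-- what changed: A rescans sums twice per number (min(sums) then sums.index); B keeps a priority queue as a lexicographically sorted list of (sum, line) pairs, popping the head and re-inserting in order, and rebuilds sums from the queue at the end.
-- outside the precondition, e.g. on distribute_str_qty_greedy([1], 0): A raises ValueError, B raises IndexError
import Mathlib
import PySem

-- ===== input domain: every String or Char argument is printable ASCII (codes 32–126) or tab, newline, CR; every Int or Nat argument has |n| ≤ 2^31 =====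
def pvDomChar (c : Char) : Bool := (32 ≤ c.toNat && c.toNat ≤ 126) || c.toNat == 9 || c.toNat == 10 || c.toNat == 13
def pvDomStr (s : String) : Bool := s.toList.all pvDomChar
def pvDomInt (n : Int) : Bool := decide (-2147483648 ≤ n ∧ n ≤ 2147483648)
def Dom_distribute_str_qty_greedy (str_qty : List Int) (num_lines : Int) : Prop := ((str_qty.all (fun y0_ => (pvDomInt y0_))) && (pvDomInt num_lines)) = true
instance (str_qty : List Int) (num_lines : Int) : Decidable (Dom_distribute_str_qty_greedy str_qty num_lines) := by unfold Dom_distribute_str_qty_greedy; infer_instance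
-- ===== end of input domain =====

-- B replaces A's per-number double scan of `sums` (min + index) by a priority
-- queue kept as a lexicographically sorted list of (sum, line) pairs: pop the
-- head, re-insert in order (objective: alternative). Equivalence is about the
-- return value; both Pythons also sort `str_qty` in place identically.

-- ===== PORT A =====
-- one step of A's for-loop: find line with smallest sum, append, update sum
def pvStepA (st : List (List Int) × List Int) (number : Int) : List (List Int) × List Int :=
  match PySem.List.min? st.2 (fun x => x) with
  | none => st        -- Python raises ValueError on min([]) ; excluded by Pre_
  | some mn =>
    match PySem.List.index? st.2 mn with
    | none => st      -- unreachable: mn ∈ sums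
    | some i => (st.1.modify i (· ++ [number]), st.2.modify i (· + number))

def distribute_str_qty_greedy (str_qty : List Int) (num_lines : Int) : List (List Int) × List Int :=
  let sq := PySem.List.sorted str_qty (fun x => x) (reverse := true)
  let lines0 : List (List Int) := (PySem.List.pyRange 0 num_lines 1).map (fun _ => ([] : List Int))
  let sums0 : List Int := PySem.List.pyRepeat [(0 : Int)] num_lines
  sq.foldl pvStepA (lines0, sums0)

-- ===== PORT B =====
-- pq[k] < new : Python tuple comparison, lexicographic
def pvPairLt (a b : Int × Int) : Bool := a.1 < b.1 || (a.1 == b.1 && a.2 < b.2)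

-- the `while k < len(pq) and pq[k] < new` scan + `pq.insert(k, new)`
def pvInsert (x : Int × Int) : List (Int × Int) → List (Int × Int)
  | [] => [x]
  | y :: ys => if pvPairLt y x then y :: pvInsert x ys else x :: y :: ys

-- one step of B's for-loop: pop the head of the sorted pq, append, re-insert
def pvStepB (st : List (List Int) × List (Int × Int)) (number : Int) : List (List Int) × List (Int × Int) :=
  match st.2 with
  | [] => st          -- Python raises IndexError on pq[0] ; excluded by Pre_
  | (s, i) :: rest => (st.1.modify i.toNat (· ++ [number]), pvInsert (s + number, i) rest)

def distribute_str_qty_greedy_alt (str_qty : List Int) (num_lines : Int) : List (List Int) × List Int :=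
  let sq := PySem.List.sorted str_qty (fun x => x) (reverse := true)
  let m : Int := if 0 < num_lines then num_lines else 0
  let lines0 : List (List Int) := (PySem.List.pyRange 0 m 1).map (fun _ => ([] : List Int))
  let pq0 : List (Int × Int) := (PySem.List.pyRange 0 m 1).map (fun i => ((0 : Int), i))
  let st := sq.foldl pvStepB (lines0, pq0)
  let sums := st.2.foldl (fun acc p => acc.set p.2.toNat p.1) (PySem.List.pyRepeat [(0 : Int)] m)
  (st.1, sums)

-- ===== PRECONDITION & SPEC =====
-- Pre_ excludes exactly the inputs where A raises: num_lines ≤ 0 with a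
-- nonempty str_qty makes min(sums)=min([]) raise ValueError (B raises too).
def Pre_distribute_str_qty_greedy (str_qty : List Int) (num_lines : Int) : Prop :=
  0 < num_lines ∨ str_qty = []
instance (str_qty : List Int) (num_lines : Int) : Decidable (Pre_distribute_str_qty_greedy str_qty num_lines) := by unfold Pre_distribute_str_qty_greedy; infer_instance
def pvWitness_distribute_str_qty_greedy : List Int × Int := ([5, 1, 4, 2, 3], 2)

def Spec_distribute_str_qty_greedy (str_qty : List Int) (num_lines : Int) (out : List (List Int) × List Int) : Prop := out = distribute_str_qty_greedy_alt str_qty num_lines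
instance (str_qty : List Int) (num_lines : Int) (out : List (List Int) × List Int) : Decidable (Spec_distribute_str_qty_greedy str_qty num_lines out) := by unfold Spec_distribute_str_qty_greedy; infer_instance

-- ===== CLAIM (what is proved, stated in full; the proofs are below) =====
def Claim_equal_distribute_str_qty_greedy : Prop := ∀ (str_qty : List Int) (num_lines : Int), Dom_distribute_str_qty_greedy str_qty num_lines → Pre_distribute_str_qty_greedy str_qty num_lines → Spec_distribute_str_qty_greedy str_qty num_lines (distribute_str_qty_greedy str_qty num_lines)

-- ===== LEMMAS AND PROOFS =====

-- (sum, index) pairs of a sums list, indices starting at k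
def pvEIdx : List Int → Int → List (Int × Int)
  | [], _ => []
  | s :: t, k => (s, k) :: pvEIdx t (k + 1)

-- strict lexicographic order on pairs, Prop form
def pvLt (a b : Int × Int) : Prop := a.1 < b.1 ∨ (a.1 = b.1 ∧ a.2 < b.2)

lemma pvPairLt_iff (a b : Int × Int) : pvPairLt a b = true ↔ pvLt a b := by
  simp [pvPairLt, pvLt]

lemma pvLt_trans {a b c : Int × Int} (h1 : pvLt a b) (h2 : pvLt b c) : pvLt a c := by
  rcases h1 with h1 | ⟨h1, h1'⟩ <;> rcases h2 with h2 | ⟨h2, h2'⟩ <;>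
    simp [pvLt] <;> omega

lemma pvLt_total {a b : Int × Int} (hne : a.2 ≠ b.2) (h : ¬ pvLt b a) : pvLt a b := by
  simp [pvLt] at *; omega

lemma length_pvEIdx (sums : List Int) (k : Int) : (pvEIdx sums k).length = sums.length := by
  induction sums generalizing k with
  | nil => rfl
  | cons s t ih => simp [pvEIdx, ih]

lemma mem_pvEIdx {p : Int × Int} {sums : List Int} {k : Int} :
    p ∈ pvEIdx sums k ↔ ∃ j : Nat, ∃ hj : j < sums.length, p = (sums[j], k + j) := by
  induction sums generalizing k with
  | nil => simp [pvEIdx]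
  | cons s t ih =>
    simp only [pvEIdx, List.mem_cons, ih]
    constructor
    · rintro (rfl | ⟨j, hj, rfl⟩)
      · exact ⟨0, by simp, by simp⟩
      · exact ⟨j + 1, by simpa using hj, by simp; ring_nf⟩
    · rintro ⟨j, hj, rfl⟩
      cases j with
      | zero => left; simp
      | succ j => right; exact ⟨j, by simpa using hj, by simp; ring_nf⟩

lemma getElem_pvEIdx {sums : List Int} {k : Int} {j : Nat} (hj : j < sums.length) :
    (pvEIdx sums k)[j]'(by rw [length_pvEIdx]; exact hj) = (sums[j], k + j) := by
  induction sums generalizing k j with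
  | nil => simp at hj
  | cons s t ih =>
    cases j with
    | zero => simp [pvEIdx]
    | succ j =>
      simp only [pvEIdx, List.getElem_cons_succ]
      rw [ih (by simpa using hj)]
      congr 1
      push_cast
      ring_nf

lemma pvEIdx_snd_ge {p : Int × Int} {sums : List Int} {k : Int} (h : p ∈ pvEIdx sums k) : k ≤ p.2 := by
  rcases mem_pvEIdx.1 h with ⟨j, hj, rfl⟩
  show k ≤ k + (j : Int)
  omega

lemma pvEIdx_pairwise_snd (sums : List Int) (k : Int) :
    (pvEIdx sums k).Pairwise (fun a b => a.2 < b.2) := by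
  induction sums generalizing k with
  | nil => exact List.Pairwise.nil
  | cons s t ih =>
    refine List.Pairwise.cons ?_ (ih (k + 1))
    intro b hb
    have := pvEIdx_snd_ge hb
    simp; omega

lemma pvEIdx_set {sums : List Int} {j : Nat} (hj : j < sums.length) (v : Int) (k : Int) :
    pvEIdx (sums.set j v) k = (pvEIdx sums k).set j (v, k + j) := by
  induction sums generalizing k j with
  | nil => simp at hj
  | cons s t ih =>
    cases j with
    | zero => simp [pvEIdx]
    | succ j =>
      simp only [List.set_cons_succ, pvEIdx, ih (by simpa using hj)]
      congr 2
      push_cast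
      ring_nf

lemma perm_set_cons_eraseIdx {α : Type} {l : List α} {j : Nat} (hj : j < l.length) (v : α) :
    (l.set j v).Perm (v :: l.eraseIdx j) := by
  induction l generalizing j with
  | nil => simp at hj
  | cons x t ih =>
    cases j with
    | zero => simp
    | succ j =>
      simp only [List.set_cons_succ, List.eraseIdx_cons_succ]
      exact ((ih (by simpa using hj)).cons x).trans (List.Perm.swap v x _)

lemma perm_cons_eraseIdx {α : Type} {l : List α} {j : Nat} (hj : j < l.length) :
    l.Perm (l[j] :: l.eraseIdx j) := by
  have := perm_set_cons_eraseIdx hj l[j]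
  rwa [List.set_getElem_self] at this

lemma pvInsert_perm (x : Int × Int) (l : List (Int × Int)) : (pvInsert x l).Perm (x :: l) := by
  induction l with
  | nil => exact List.Perm.refl _
  | cons y ys ih =>
    simp only [pvInsert]
    split
    · exact (ih.cons y).trans (List.Perm.swap x y ys)
    · exact List.Perm.refl _

lemma pvInsert_pairwise {x : Int × Int} {l : List (Int × Int)}
    (hl : l.Pairwise pvLt) (hne : ∀ y ∈ l, y.2 ≠ x.2) :
    (pvInsert x l).Pairwise pvLt := by
  induction l with
  | nil => simp [pvInsert]
  | cons y ys ih =>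
    rcases List.pairwise_cons.1 hl with ⟨hy, hys⟩
    simp only [pvInsert]
    split
    · rename_i hlt
      refine List.pairwise_cons.2 ⟨?_, ih hys (fun z hz => hne z (List.mem_cons_of_mem y hz))⟩
      intro z hz
      have hz' := (pvInsert_perm x ys).mem_iff.1 hz
      rcases List.mem_cons.1 hz' with rfl | hz''
      · exact (pvPairLt_iff y z).1 hlt
      · exact hy z hz''
    · rename_i hnlt
      have hxy : pvLt x y := pvLt_total (fun h => hne y List.mem_cons_self h.symm)
        (fun h => hnlt ((pvPairLt_iff y x).2 h))
      refine List.pairwise_cons.2 ⟨?_, hl⟩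
      intro z hz
      rcases List.mem_cons.1 hz with rfl | hz'
      · exact hxy
      · exact pvLt_trans hxy (hy z hz')

lemma pvSndNodup {sums : List Int} {pq : List (Int × Int)} (h : pq.Perm (pvEIdx sums 0)) :
    (pq.map (·.2)).Nodup := by
  refine ((h.map (·.2)).nodup_iff).2 ?_
  exact List.Pairwise.map _ (fun a b hab => Int.ne_of_lt hab) (pvEIdx_pairwise_snd sums 0)

-- main loop invariant: the sorted pq is a permutation of the indexed sums
def pvInv (sums : List Int) (pq : List (Int × Int)) : Prop :=
  pq.Pairwise pvLt ∧ pq.Perm (pvEIdx sums 0)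

lemma pvInv_step {sums : List Int} {pq : List (Int × Int)} (h : pvInv sums pq) (number : Int) :
    (match pq with
     | [] => sums = [] ∧ PySem.List.min? sums (fun x => x) = none
     | (s, i) :: rest =>
         ∃ j : Nat, ∃ hj : j < sums.length, (i : Int) = (j : Int) ∧ sums[j] = s ∧
           PySem.List.min? sums (fun x => x) = some s ∧
           PySem.List.index? sums s = some j ∧
           pvInv (sums.set j (s + number)) (pvInsert (s + number, i) rest)) := by
  obtain ⟨hpw, hperm⟩ := h
  match pq, hpw, hperm with
  | [], hpw, hperm =>
    have he : pvEIdx sums 0 = [] := (List.Perm.nil_eq hperm).symm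
    have hs : sums = [] := by
      cases sums with
      | nil => rfl
      | cons a t => simp [pvEIdx] at he
    exact ⟨hs, by rw [hs]; exact (PySem.List.min?_eq_none_iff _ _).2 rfl⟩
  | (s, i) :: rest, hpw, hperm =>
    have hmem : (s, i) ∈ pvEIdx sums 0 := hperm.mem_iff.1 List.mem_cons_self
    rcases mem_pvEIdx.1 hmem with ⟨j, hj, hpj⟩
    have hij : i = (j : Int) := by
      have := congrArg Prod.snd hpj; simpa using this
    have hsj : sums[j] = s := by
      have := congrArg Prod.fst hpj; simp at this; omega
    -- the head of pq is below every entry of pq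
    have hhead : ∀ q ∈ pvEIdx sums 0, q = (s, i) ∨ pvLt (s, i) q := by
      intro q hq
      rcases List.mem_cons.1 (hperm.mem_iff.2 hq) with h1 | h1
      · exact Or.inl h1
      · exact Or.inr ((List.pairwise_cons.1 hpw).1 q h1)
    -- min(sums) = s
    have hne : sums ≠ [] := by intro hs; rw [hs] at hj; simp at hj
    obtain ⟨mn, hmn⟩ : ∃ mn, PySem.List.min? sums (fun x => x) = some mn := by
      cases hmin : PySem.List.min? sums (fun x => x) with
      | none => exact absurd ((PySem.List.min?_eq_none_iff _ _).1 hmin) hne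
      | some mn => exact ⟨mn, rfl⟩
    have hmin_eq : mn = s := by
      have h1 : mn ≤ s := by
        have := PySem.List.min?_isMin hmn (sums[j]) (List.getElem_mem hj)
        simpa [hsj] using this
      have h2 : s ≤ mn := by
        have hmm : mn ∈ sums := PySem.List.min?_mem hmn
        rcases List.mem_iff_getElem.1 hmm with ⟨j', hj', hj'e⟩
        have : ((mn, ((0 : Int) + j'))) ∈ pvEIdx sums 0 :=
          mem_pvEIdx.2 ⟨j', hj', by rw [hj'e]⟩
        rcases hhead _ this with h3 | h3
        · have := congrArg Prod.fst h3; simp at this; omega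
        · rcases h3 with h3 | ⟨h3, _⟩ <;> simp at h3 <;> omega
      omega
    -- index(sums, s) = j : no earlier occurrence of s
    have hidx : PySem.List.index? sums s = some j := by
      rw [PySem.List.index?_eq_some_iff]
      refine ⟨sums.take j, sums.drop (j + 1), ?_, List.length_take_of_le (Nat.le_of_lt hj), ?_⟩
      · conv_lhs => rw [← List.take_append_drop j sums]
        rw [List.drop_eq_getElem_cons hj, hsj]
      · intro hmem'
        rcases List.mem_take_iff_getElem.1 hmem' with ⟨j', hj', hj'e⟩
        have hj'lt : j' < j := by omega
        have hj'len : j' < sums.length := by omega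
        have : ((s, ((0 : Int) + j'))) ∈ pvEIdx sums 0 := mem_pvEIdx.2 ⟨j', hj'len, by rw [hj'e]⟩
        rcases hhead _ this with h3 | h3
        · have := congrArg Prod.snd h3; simp [hij] at this; omega
        · rcases h3 with h3 | ⟨_, h3⟩
          · simp at h3
          · simp [hij] at h3; omega
    -- re-inserted pq matches the updated sums
    have hnd := pvSndNodup hperm
    have hne_rest : ∀ y ∈ rest, y.2 ≠ ((s + number, i)).2 := by
      intro y hy
      simp only [List.map_cons, List.nodup_cons] at hnd
      intro hcon
      have hcon' : y.2 = i := hcon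
      exact hnd.1 (hcon' ▸ List.mem_map_of_mem hy)
    have hrest_perm : rest.Perm ((pvEIdx sums 0).eraseIdx j) := by
      have h1 : (pvEIdx sums 0).Perm ((s, i) :: (pvEIdx sums 0).eraseIdx j) := by
        have := perm_cons_eraseIdx (l := pvEIdx sums 0) (j := j)
          (by rw [length_pvEIdx]; exact hj)
        rwa [getElem_pvEIdx hj, hsj, zero_add, ← hij] at this
      exact (hperm.trans h1).cons_inv
    have hperm' : (pvInsert (s + number, i) rest).Perm (pvEIdx (sums.set j (s + number)) 0) := by
      rw [pvEIdx_set hj]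
      refine (pvInsert_perm _ _).trans ?_
      refine ((hrest_perm.cons _).trans ?_)
      have := perm_set_cons_eraseIdx (l := pvEIdx sums 0) (j := j)
        (by rw [length_pvEIdx]; exact hj) ((s + number, (0 : Int) + j))
      rw [show i = (0 : Int) + (j : Int) by omega]
      exact this.symm
    refine ⟨j, hj, hij, hsj, by rw [hmn, hmin_eq], hidx, ?_, hperm'⟩
    exact pvInsert_pairwise (List.pairwise_cons.1 hpw).2 hne_rest

lemma pvFoldSet_length (ps : List (Int × Int)) (acc : List Int) :
    (ps.foldl (fun acc p => acc.set p.2.toNat p.1) acc).length = acc.length := by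
  induction ps generalizing acc with
  | nil => rfl
  | cons p ps ih => simp [List.foldl_cons, ih]

lemma pvFoldSet_getElem?_of_ne (ps : List (Int × Int)) (acc : List Int) (j : Nat)
    (hne : ∀ p ∈ ps, p.2.toNat ≠ j) :
    (ps.foldl (fun acc p => acc.set p.2.toNat p.1) acc)[j]? = acc[j]? := by
  induction ps generalizing acc with
  | nil => rfl
  | cons p ps ih =>
    rw [List.foldl_cons, ih _ (fun q hq => hne q (List.mem_cons_of_mem p hq)),
      List.getElem?_set_ne (hne p List.mem_cons_self)]

lemma pvWriteback {sums : List Int} {pq : List (Int × Int)} (h : pq.Perm (pvEIdx sums 0))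
    {acc : List Int} (hlen : acc.length = sums.length) :
    pq.foldl (fun acc p => acc.set p.2.toNat p.1) acc = sums := by
  apply List.ext_getElem?
  intro j
  by_cases hj : j < sums.length
  · have hmem : ((sums[j], (j : Int))) ∈ pq :=
      h.mem_iff.2 (mem_pvEIdx.2 ⟨j, hj, by simp⟩)
    obtain ⟨l1, l2, hpq⟩ := List.append_of_mem hmem
    have hnd := pvSndNodup h
    rw [hpq] at hnd
    have hl2 : ∀ p ∈ l2, p.2.toNat ≠ j := by
      intro p hp hpj
      have hp2 : 0 ≤ p.2 := by
        have : p ∈ pvEIdx sums 0 := h.mem_iff.1 (by rw [hpq]; simp [hp])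
        rcases mem_pvEIdx.1 this with ⟨j', hj', rfl⟩
        show (0 : Int) ≤ 0 + (j' : Int)
        omega
      have hpj' : p.2 = (j : Int) := by omega
      simp only [List.map_append, List.map_cons, List.nodup_append, List.nodup_cons] at hnd
      exact hnd.2.1.1 (by rw [← hpj']; exact List.mem_map_of_mem hp)
    rw [hpq, List.foldl_append, List.foldl_cons]
    rw [pvFoldSet_getElem?_of_ne l2 _ j hl2]
    have hlen1 : ((l1.foldl (fun acc p => acc.set p.2.toNat p.1) acc).set (j:Int).toNat (sums[j])).length = sums.length := by
      rw [List.length_set, pvFoldSet_length, hlen]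
    simp only [Int.toNat_natCast]
    rw [List.getElem?_set_self (by rw [pvFoldSet_length, hlen]; exact hj)]
    rw [List.getElem?_eq_getElem hj]
  · have hj1 : sums.length ≤ j := Nat.le_of_not_lt hj
    rw [List.getElem?_eq_none hj1, List.getElem?_eq_none]
    rw [pvFoldSet_length, hlen]
    exact hj1

lemma pvLoop (sq : List Int) :
    ∀ (lines : List (List Int)) (sums : List Int) (pq : List (Int × Int)), pvInv sums pq →
    ∃ lines' sums' pq',
      sq.foldl pvStepA (lines, sums) = (lines', sums') ∧
      sq.foldl pvStepB (lines, pq) = (lines', pq') ∧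
      sums'.length = sums.length ∧ pvInv sums' pq' := by
  induction sq with
  | nil => exact fun lines sums pq h => ⟨lines, sums, pq, rfl, rfl, rfl, h⟩
  | cons n sq ih =>
    intro lines sums pq h
    have hstep := pvInv_step h n
    match pq, h, hstep with
    | [], h, hstep =>
      obtain ⟨hs, hmin⟩ := hstep
      simp only [List.foldl_cons]
      have hA : pvStepA (lines, sums) n = (lines, sums) := by simp [pvStepA, hmin]
      have hB : pvStepB (lines, ([] : List (Int × Int))) n = (lines, []) := by simp [pvStepB]
      rw [hA, hB]
      exact ih lines sums [] h
    | (s, i) :: rest, h, hstep =>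
      obtain ⟨j, hj, hij, hsj, hmin, hidx, hinv'⟩ := hstep
      simp only [List.foldl_cons]
      have hA : pvStepA (lines, sums) n = (lines.modify j (· ++ [n]), sums.set j (s + n)) := by
        simp only [pvStepA, hmin, hidx]
        congr 1
        rw [List.modify_eq_set_get _ hj]; simp only [List.get_eq_getElem, hsj]
      have hB : pvStepB (lines, (s, i) :: rest) n
          = (lines.modify j (· ++ [n]), pvInsert (s + n, i) rest) := by
        simp only [pvStepB, hij, Int.toNat_natCast]
      rw [hA, hB]
      obtain ⟨l', s', p', e1, e2, hlen, hinv''⟩ := ih _ _ _ hinv'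
      exact ⟨l', s', p', e1, e2, by rw [hlen, List.length_set], hinv''⟩

lemma pvEIdx_replicate (nn : Nat) (k : Int) :
    pvEIdx (List.replicate nn (0 : Int)) k
      = (PySem.List.pyRange k (k + nn) 1).map (fun i => ((0 : Int), i)) := by
  induction nn generalizing k with
  | zero =>
    simp only [List.replicate, pvEIdx]
    rw [PySem.List.pyRange_one_eq_nil (by omega)]
    rfl
  | succ nn ih =>
    simp only [List.replicate, pvEIdx]
    rw [PySem.List.pyRange_one_cons (by omega), List.map_cons, ih (k + 1),
      show k + 1 + (nn : Int) = k + ((nn + 1 : Nat) : Int) by push_cast; ring]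

lemma pvEIdx_replicate_pairwise (nn : Nat) :
    (pvEIdx (List.replicate nn (0 : Int)) 0).Pairwise pvLt := by
  refine List.Pairwise.imp_of_mem ?_ (pvEIdx_pairwise_snd _ 0)
  intro a b ha hb hlt
  rcases mem_pvEIdx.1 ha with ⟨j, hj, rfl⟩
  rcases mem_pvEIdx.1 hb with ⟨j', hj', rfl⟩
  exact Or.inr ⟨by simp, hlt⟩

-- ===== VERDICT (by name: the statement is the Claim_ definition above) =====
theorem distribute_str_qty_greedy_spec : Claim_equal_distribute_str_qty_greedy := by
  intro str_qty num_lines _ _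
  simp only [Spec_distribute_str_qty_greedy, distribute_str_qty_greedy,
    distribute_str_qty_greedy_alt]
  have hm : (if 0 < num_lines then num_lines else 0) = ((num_lines.toNat : Int)) := by
    split <;> omega
  have hrange : PySem.List.pyRange 0 num_lines 1 = PySem.List.pyRange 0 ((num_lines.toNat : Int)) 1 := by
    by_cases h : 0 < num_lines
    · rw [Int.toNat_of_nonneg (Int.le_of_lt h)]
    · rw [PySem.List.pyRange_one_eq_nil (by omega), PySem.List.pyRange_one_eq_nil (by omega)]
  rw [hm, hrange, PySem.List.pyRepeat_singleton, PySem.List.pyRepeat_singleton,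
    Int.toNat_natCast]
  have hpq0 : ((PySem.List.pyRange 0 ((num_lines.toNat : Int)) 1).map (fun i => ((0 : Int), i)))
      = pvEIdx (List.replicate num_lines.toNat 0) 0 := by
    rw [pvEIdx_replicate]
    norm_num
  have hinv : pvInv (List.replicate num_lines.toNat 0)
      ((PySem.List.pyRange 0 ((num_lines.toNat : Int)) 1).map (fun i => ((0 : Int), i))) := by
    constructor
    · rw [hpq0]; exact pvEIdx_replicate_pairwise _
    · rw [hpq0]
  obtain ⟨l', s', p', e1, e2, hlen, hpw', hperm'⟩ :=
    pvLoop (PySem.List.sorted str_qty (fun x => x) (reverse := true)) _ _ _ hinv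
  rw [e1, e2]
  refine Prod.ext rfl ?_
  exact (pvWriteback hperm' (by rw [List.length_replicate, hlen, List.length_replicate])).symm
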